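-- pv_equiv track=rewrite | github.com/Charjabug/lc | 26.py | checkint
-- ===== SOURCE A (Python) =====
-- def checkint(n:str):
--     for i in n:
--         if ord(i)<48 or ord(i)>57:
--             return False
--     if len(n)<1 or len(n)>3:
--         return False
--     if len(n)>1 and n[0]=='0':
--         return False
--     return True
-- ===== SOURCE B (Python) =====
-- import re
--
-- _NUM = re.compile(r'[1-9][0-9]{0,2}|0')
--
-- def checkint(n: str):
--     return bool(_NUM.fullmatch(n))
-- ===== Notes on version B (the rewrite author's own statement) =====
-- stated objective: idiomatic
-- what changed: Replaced the explicit character loop plus three sequential length/leading-zero checks with a single anchored regex fullmatch r'[1-9][0-9]{0,2}|0'.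
import Mathlib
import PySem

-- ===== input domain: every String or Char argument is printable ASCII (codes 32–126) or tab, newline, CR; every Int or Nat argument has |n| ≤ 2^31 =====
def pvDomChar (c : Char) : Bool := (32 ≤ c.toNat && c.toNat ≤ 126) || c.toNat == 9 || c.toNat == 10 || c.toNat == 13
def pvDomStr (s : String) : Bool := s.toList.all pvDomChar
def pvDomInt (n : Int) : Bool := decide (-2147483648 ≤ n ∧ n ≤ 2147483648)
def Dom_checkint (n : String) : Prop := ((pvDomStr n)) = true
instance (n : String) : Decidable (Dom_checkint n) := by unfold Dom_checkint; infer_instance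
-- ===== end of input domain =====

-- B replaces A's explicit char loop + three sequential checks with one anchored regex fullmatch (idiomatic; same cost).

-- ===== PORT A =====
-- the 'for i in n: if ord(i)<48 or ord(i)>57: return False' loop
def checkintLoop : List Char → Bool
  | [] => true
  | c :: rest => if c.toNat < 48 || c.toNat > 57 then false else checkintLoop rest

def checkint (n : String) : Bool :=
  let cs := n.toList
  if checkintLoop cs = false then false
  else if cs.length < 1 || cs.length > 3 then false
  else if decide (cs.length > 1) && (cs.head? == some '0') then false
  else true

-- ===== PORT B =====
-- matcher for the branch [1-9][0-9]{0,2} of the regex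
def checkintRe1 : List Char → Bool
  | [] => false
  | c :: rest =>
      (49 ≤ c.toNat && c.toNat ≤ 57) && decide (rest.length ≤ 2)
        && rest.all (fun d => 48 ≤ d.toNat && d.toNat ≤ 57)

-- fullmatch of r'[1-9][0-9]{0,2}|0'
def checkint_alt (n : String) : Bool :=
  checkintRe1 n.toList || (n.toList == ['0'])

-- ===== PRECONDITION & SPEC =====
def Spec_checkint (n : String) (out : Bool) : Prop := out = checkint_alt n
instance (n : String) (out : Bool) : Decidable (Spec_checkint n out) := by unfold Spec_checkint; infer_instance

-- ===== CLAIM (what is proved, stated in full; the proofs are below) =====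
def Claim_equal_checkint : Prop := ∀ (n : String), Dom_checkint n → Spec_checkint n (checkint n)

-- ===== LEMMAS AND PROOFS =====

-- A's loop accepts exactly the all-digit strings
theorem checkintLoop_eq_all (cs : List Char) :
    checkintLoop cs = cs.all (fun d => 48 ≤ d.toNat && d.toNat ≤ 57) := by
  induction cs with
  | nil => rfl
  | cons c rest ih =>
      simp only [checkintLoop, List.all_cons, ← ih]
      by_cases h : c.toNat < 48 ∨ c.toNat > 57
      · have hb : (decide (c.toNat < 48) || decide (c.toNat > 57)) = true := by
          simpa using h
        rw [if_pos hb]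
        have : (decide (48 ≤ c.toNat) && decide (c.toNat ≤ 57)) = false := by
          simp; omega
        simp [this]
      · have hb : (decide (c.toNat < 48) || decide (c.toNat > 57)) = false := by
          simp; omega
        rw [if_neg (by simp [hb])]
        have : (decide (48 ≤ c.toNat) && decide (c.toNat ≤ 57)) = true := by
          simp; omega
        simp [this]

theorem checkint_eq_alt_list (n : String) : checkint n = checkint_alt n := by
  unfold checkint checkint_alt checkintRe1
  have h0 : ∀ x : Char, (x == '0') = decide (x.toNat = 48) := by
    intro x
    rw [Bool.eq_iff_iff, beq_iff_eq, decide_eq_true_eq]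
    exact ⟨fun h => by subst h; rfl,
      fun h => Char.ext (UInt32.toNat_inj.mp h)⟩
  rcases hcs : n.toList with _ | ⟨a, _ | ⟨b, _ | ⟨c, _ | ⟨d, t⟩⟩⟩⟩ <;>
    (first
      | rfl
      | (rw [Bool.eq_iff_iff]
         simp [checkintLoop_eq_all, h0]
         try omega))

-- ===== VERDICT (by name: the statement is the Claim_ definition above) =====
theorem checkint_spec : Claim_equal_checkint := by
  intro n _
  unfold Spec_checkint
  exact checkint_eq_alt_list n
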